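-- pv_equiv track=rewrite | github.com/rixyn/hyperskill-python-core | learning-progress-tracker/stage5.py | find_most_and_least_popular
-- ===== SOURCE A (Python) =====
-- def find_most_and_least_popular(enrollment_stats):
--     max_enrollment = max(enrollment_stats.values(), default=0)
--     min_enrollment = min(enrollment_stats.values(), default=0)
--
--     if min_enrollment > 0 and min_enrollment == max_enrollment:
--         least_popular = []
--         most_popular = [course for course,
--                         count in enrollment_stats.items() if count == max_enrollment] if max_enrollment else []
--     else:
--         most_popular = [course for course,
--                         count in enrollment_stats.items() if count == max_enrollment] if max_enrollment else []
--         least_popular = [course for course,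
--                          count in enrollment_stats.items() if count == min_enrollment] if min_enrollment else []
--
--     return most_popular, least_popular
-- ===== SOURCE B (Python) =====
-- def find_most_and_least_popular(enrollment_stats):
--     buckets = {}
--     for course, count in enrollment_stats.items():
--         buckets.setdefault(count, []).append(course)
--     if not buckets:
--         return [], []
--     hi = max(buckets)
--     lo = min(buckets)
--     most = buckets[hi] if hi != 0 else []
--     least = [] if lo == 0 or (lo == hi and lo > 0) else buckets[lo]
--     return most, least
-- ===== Notes on version B (the rewrite author's own statement) =====
-- stated objective: alternative
-- what changed: B makes one grouping pass building a count->courses dict and answers by two key lookups, instead of A's separate max/min scans plus up to two full-list filter comprehensions.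
import Mathlib
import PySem

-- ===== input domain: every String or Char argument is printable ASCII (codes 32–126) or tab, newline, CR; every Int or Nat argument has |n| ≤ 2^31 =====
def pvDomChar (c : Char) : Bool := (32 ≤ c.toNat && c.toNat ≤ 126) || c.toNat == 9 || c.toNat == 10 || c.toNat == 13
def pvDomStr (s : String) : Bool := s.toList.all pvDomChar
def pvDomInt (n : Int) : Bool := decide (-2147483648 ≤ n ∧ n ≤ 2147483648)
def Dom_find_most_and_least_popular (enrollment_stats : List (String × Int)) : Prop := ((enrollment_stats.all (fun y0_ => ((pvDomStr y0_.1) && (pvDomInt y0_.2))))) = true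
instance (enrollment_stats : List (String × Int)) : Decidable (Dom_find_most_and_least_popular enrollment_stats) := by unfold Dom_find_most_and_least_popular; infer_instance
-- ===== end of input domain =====

-- B replaces A's repeated full-list filters by one grouping pass into a count → courses dict (alternative decomposition; no asymptotic change).

-- ===== PORT A =====
def find_most_and_least_popular (enrollment_stats : List (String × Int)) : List String × List String :=
  let max_enrollment := (PySem.List.max? (enrollment_stats.map Prod.snd) (fun x => x)).getD 0
  let min_enrollment := (PySem.List.min? (enrollment_stats.map Prod.snd) (fun x => x)).getD 0
  if min_enrollment > 0 ∧ min_enrollment = max_enrollment then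
    let least_popular : List String := []
    let most_popular := if max_enrollment ≠ 0 then
        (enrollment_stats.filter (fun p => p.2 == max_enrollment)).map Prod.fst else []
    (most_popular, least_popular)
  else
    let most_popular := if max_enrollment ≠ 0 then
        (enrollment_stats.filter (fun p => p.2 == max_enrollment)).map Prod.fst else []
    let least_popular := if min_enrollment ≠ 0 then
        (enrollment_stats.filter (fun p => p.2 == min_enrollment)).map Prod.fst else []
    (most_popular, least_popular)

-- ===== PORT B =====
-- buckets.setdefault(count, []).append(course) is d[count] = d.get(count, []) ++ [course], i.e. Dict.modify
def pvBuckets (enrollment_stats : List (String × Int)) : PySem.Dict Int (List String) :=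
  enrollment_stats.foldl (fun d p => d.modify p.2 [] (fun l => l ++ [p.1])) PySem.Dict.empty

def find_most_and_least_popular_alt (enrollment_stats : List (String × Int)) : List String × List String :=
  let buckets := pvBuckets enrollment_stats
  if buckets.size = 0 then ([], [])
  else
    let hi := (PySem.List.max? buckets.keys (fun x => x)).getD 0
    let lo := (PySem.List.min? buckets.keys (fun x => x)).getD 0
    let most := if hi ≠ 0 then buckets.getD hi [] else []
    let least := if lo = 0 ∨ (lo = hi ∧ lo > 0) then [] else buckets.getD lo []
    (most, least)

-- ===== PRECONDITION & SPEC =====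
def Spec_find_most_and_least_popular (enrollment_stats : List (String × Int)) (out : List String × List String) : Prop := out = find_most_and_least_popular_alt enrollment_stats
instance (enrollment_stats : List (String × Int)) (out : List String × List String) : Decidable (Spec_find_most_and_least_popular enrollment_stats out) := by unfold Spec_find_most_and_least_popular; infer_instance

-- ===== CLAIM (what is proved, stated in full; the proofs are below) =====
def Claim_equal_find_most_and_least_popular : Prop := ∀ (enrollment_stats : List (String × Int)), Dom_find_most_and_least_popular enrollment_stats → Spec_find_most_and_least_popular enrollment_stats (find_most_and_least_popular enrollment_stats)

-- ===== LEMMAS AND PROOFS =====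

lemma pvBuckets_getD (es : List (String × Int)) (c : Int) :
    (pvBuckets es).getD c [] = (es.filter (fun p => p.2 == c)).map Prod.fst := by
  have h : pvBuckets es
      = (es.map Prod.swap).foldl (fun d p => d.modify p.1 [] (fun l => l ++ [p.2])) PySem.Dict.empty := by
    simp [pvBuckets, List.foldl_map, Prod.swap]
  rw [h, PySem.Dict.getD_foldl_modify_append]
  simp only [PySem.Dict.getD_empty, List.nil_append]
  clear h
  induction es with
  | nil => rfl
  | cons a t ih => by_cases hc : a.2 == c <;> simp [Prod.swap, hc, ih]

lemma pvBuckets_keys (es : List (String × Int)) :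
    (pvBuckets es).keys = PySem.Set.ofList (es.map Prod.snd) := by
  rw [pvBuckets, PySem.Dict.keys_foldl_modify_key (key := Prod.snd)]
  exact PySem.Set.update_nil_left _

lemma mem_pvBuckets_keys (es : List (String × Int)) (k : Int) :
    k ∈ (pvBuckets es).keys ↔ k ∈ es.map Prod.snd := by
  rw [pvBuckets_keys, PySem.Set.mem_ofList]

lemma pvBuckets_max (es : List (String × Int)) (h : es ≠ []) :
    PySem.List.max? (pvBuckets es).keys (fun x => x) = PySem.List.max? (es.map Prod.snd) (fun x => x) := by
  obtain ⟨m1, h1⟩ : ∃ m, PySem.List.max? (pvBuckets es).keys (fun x => x) = some m := by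
    rcases Option.eq_none_or_eq_some (PySem.List.max? (pvBuckets es).keys (fun x => x)) with hn | hs
    · rw [PySem.List.max?_eq_none_iff] at hn
      cases es with
      | nil => exact absurd rfl h
      | cons p t =>
        have : p.2 ∈ (pvBuckets (p :: t)).keys := (mem_pvBuckets_keys _ _).2 (by simp)
        simp [hn] at this
    · exact hs
  obtain ⟨m2, h2⟩ : ∃ m, PySem.List.max? (es.map Prod.snd) (fun x => x) = some m := by
    rcases Option.eq_none_or_eq_some (PySem.List.max? (es.map Prod.snd) (fun x => x)) with hn | hs
    · rw [PySem.List.max?_eq_none_iff] at hn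
      simp at hn; exact absurd hn h
    · exact hs
  rw [h1, h2]
  have hm1 := PySem.List.max?_mem h1
  have hm2 := PySem.List.max?_mem h2
  have le12 : m1 ≤ m2 := PySem.List.max?_isMax h2 m1 ((mem_pvBuckets_keys es m1).1 hm1)
  have le21 : m2 ≤ m1 := PySem.List.max?_isMax h1 m2 ((mem_pvBuckets_keys es m2).2 hm2)
  exact congrArg some (le_antisymm le12 le21)

lemma pvBuckets_min (es : List (String × Int)) (h : es ≠ []) :
    PySem.List.min? (pvBuckets es).keys (fun x => x) = PySem.List.min? (es.map Prod.snd) (fun x => x) := by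
  obtain ⟨m1, h1⟩ : ∃ m, PySem.List.min? (pvBuckets es).keys (fun x => x) = some m := by
    rcases Option.eq_none_or_eq_some (PySem.List.min? (pvBuckets es).keys (fun x => x)) with hn | hs
    · rw [PySem.List.min?_eq_none_iff] at hn
      cases es with
      | nil => exact absurd rfl h
      | cons p t =>
        have : p.2 ∈ (pvBuckets (p :: t)).keys := (mem_pvBuckets_keys _ _).2 (by simp)
        simp [hn] at this
    · exact hs
  obtain ⟨m2, h2⟩ : ∃ m, PySem.List.min? (es.map Prod.snd) (fun x => x) = some m := by
    rcases Option.eq_none_or_eq_some (PySem.List.min? (es.map Prod.snd) (fun x => x)) with hn | hs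
    · rw [PySem.List.min?_eq_none_iff] at hn
      simp at hn; exact absurd hn h
    · exact hs
  rw [h1, h2]
  have hm1 := PySem.List.min?_mem h1
  have hm2 := PySem.List.min?_mem h2
  have le21 : m2 ≤ m1 := PySem.List.min?_isMin h2 m1 ((mem_pvBuckets_keys es m1).1 hm1)
  have le12 : m1 ≤ m2 := PySem.List.min?_isMin h1 m2 ((mem_pvBuckets_keys es m2).2 hm2)
  exact congrArg some (le_antisymm le12 le21)

lemma pvBuckets_size_ne (es : List (String × Int)) (h : es ≠ []) :
    (pvBuckets es).size ≠ 0 := by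
  intro hs
  cases es with
  | nil => exact absurd rfl h
  | cons p t =>
    have hk : p.2 ∈ (pvBuckets (p :: t)).keys := (mem_pvBuckets_keys _ _).2 (by simp)
    have : (pvBuckets (p :: t)).keys = [] := by
      have := List.length_eq_zero_iff.1 hs
      simp [PySem.Dict.keys, this]
    simp [this] at hk

-- ===== VERDICT (by name: the statement is the Claim_ definition above) =====
theorem find_most_and_least_popular_spec : Claim_equal_find_most_and_least_popular := by
  intro es _
  unfold Spec_find_most_and_least_popular
  by_cases h : es = []
  · subst h; decide
  · unfold find_most_and_least_popular find_most_and_least_popular_alt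
    simp only [pvBuckets_size_ne es h, pvBuckets_max es h, pvBuckets_min es h,
      pvBuckets_getD, if_false]
    set M := (PySem.List.max? (es.map Prod.snd) (fun x => x)).getD 0 with hM
    set m := (PySem.List.min? (es.map Prod.snd) (fun x => x)).getD 0 with hm
    split_ifs <;> first | rfl | omega
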